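-- pv_equiv track=rewrite | github.com/mihos3506/GoBP | gobp/mcp/dispatcher.py | _classify_doc_priority
-- ===== SOURCE A (Python) =====
-- def _classify_doc_priority(content: str, path: str) -> str:
--     """Auto-classify document priority based on content keywords.
--
--     Rules (deterministic, no AI):
--       critical: user flows, auth, payment, proof of presence, trust gate
--       high:     entity, engine, architecture, API, database
--       medium:   design, copy, admin, notification, map
--       low:      mascot, growth, future, level system, campaign
--     """
--     content_lower = content.lower()
--     path_lower = path.lower()
--     combined = content_lower + " " + path_lower
--
--     critical_keywords = [
--         "user flow", "authentication", "proof of presence", "payment",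
--         "trust gate", "verify gate", "core flow", "master definition",
--         "pop_protocol", "mihot", "homecoming", "registration flow",
--     ]
--     high_keywords = [
--         "entity", "engine", "architecture", "api", "database",
--         "engine spec", "adapter", "domain dictionary", "migration",
--         "interface reference", "middleware", "scale",
--     ]
--     low_keywords = [
--         "mascot", "growth", "launch", "campaign", "level system",
--         "gamification", "future", "phase 2", "nice to have",
--     ]
--
--     critical_score = sum(1 for kw in critical_keywords if kw in combined)
--     high_score = sum(1 for kw in high_keywords if kw in combined)
--     low_score = sum(1 for kw in low_keywords if kw in combined)
--
--     if critical_score >= 2: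
--         return "critical"
--     elif critical_score >= 1 or high_score >= 3:
--         return "high"
--     elif low_score >= 2:
--         return "low"
--     else:
--         return "medium"
-- ===== SOURCE B (Python) =====
-- _CRITICAL_KEYWORDS = [
--     "user flow", "authentication", "proof of presence", "payment",
--     "trust gate", "verify gate", "core flow", "master definition",
--     "pop_protocol", "mihot", "homecoming", "registration flow",
-- ]
-- _HIGH_KEYWORDS = [
--     "entity", "engine", "architecture", "api", "database",
--     "engine spec", "adapter", "domain dictionary", "migration",
--     "interface reference", "middleware", "scale",
-- ]
-- _LOW_KEYWORDS = [
--     "mascot", "growth", "launch", "campaign", "level system",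
--     "gamification", "future", "phase 2", "nice to have",
-- ]
--
--
-- def _at_least(keywords, text, n):
--     """True iff at least n of `keywords` occur in `text`; stops as soon as
--     the threshold is reached, never computing a full count."""
--     if n <= 0:
--         return True
--     if not keywords:
--         return False
--     remaining = n - 1 if keywords[0] in text else n
--     return _at_least(keywords[1:], text, remaining)
--
--
-- def _classify_doc_priority(content: str, path: str) -> str:
--     """Threshold cascade of short-circuit predicates instead of three full counts."""
--     combined = content.lower() + " " + path.lower()
--     if _at_least(_CRITICAL_KEYWORDS, combined, 2):
--         return "critical"
--     if _at_least(_CRITICAL_KEYWORDS, combined, 1) or _at_least(_HIGH_KEYWORDS, combined, 3):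
--         return "high"
--     if _at_least(_LOW_KEYWORDS, combined, 2):
--         return "low"
--     return "medium"
-- ===== Notes on version B (the rewrite author's own statement) =====
-- stated objective: alternative
-- what changed: B never computes match counts: each branch of the cascade is decided by a short-circuiting recursive predicate _at_least(keywords, text, n) that walks the keyword list and returns as soon as n matches are seen (or the list ends), so thresholds are answered as boolean questions with early exit instead of summing three full per-category scores and comparing them.
import Mathlib
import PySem

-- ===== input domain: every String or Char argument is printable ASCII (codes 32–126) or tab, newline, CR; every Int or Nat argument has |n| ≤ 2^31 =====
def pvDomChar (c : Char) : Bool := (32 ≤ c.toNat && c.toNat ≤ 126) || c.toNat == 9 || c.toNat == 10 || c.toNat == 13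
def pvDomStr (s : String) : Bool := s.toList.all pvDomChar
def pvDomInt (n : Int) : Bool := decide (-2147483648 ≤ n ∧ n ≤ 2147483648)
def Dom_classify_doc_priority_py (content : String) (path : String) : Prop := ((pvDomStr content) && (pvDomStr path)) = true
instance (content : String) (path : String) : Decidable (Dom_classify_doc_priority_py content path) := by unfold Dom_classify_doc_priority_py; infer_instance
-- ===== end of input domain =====

-- B replaces A's three full per-category score sums by a cascade of short-circuiting
-- "at least n keywords match" predicates (alternative decomposition; same result).

-- ===== PORT A =====
def pvCriticalKeywords : List String :=
  ["user flow", "authentication", "proof of presence", "payment",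
   "trust gate", "verify gate", "core flow", "master definition",
   "pop_protocol", "mihot", "homecoming", "registration flow"]

def pvHighKeywords : List String :=
  ["entity", "engine", "architecture", "api", "database",
   "engine spec", "adapter", "domain dictionary", "migration",
   "interface reference", "middleware", "scale"]

def pvLowKeywords : List String :=
  ["mascot", "growth", "launch", "campaign", "level system",
   "gamification", "future", "phase 2", "nice to have"]

def classify_doc_priority_py (content : String) (path : String) : String :=
  let combined := PySem.Str.lower content ++ " " ++ PySem.Str.lower path
  let critical_score : Int :=
    (pvCriticalKeywords.map (fun kw => if PySem.Str.isIn kw combined then (1 : Int) else 0)).sum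
  let high_score : Int :=
    (pvHighKeywords.map (fun kw => if PySem.Str.isIn kw combined then (1 : Int) else 0)).sum
  let low_score : Int :=
    (pvLowKeywords.map (fun kw => if PySem.Str.isIn kw combined then (1 : Int) else 0)).sum
  if critical_score ≥ 2 then "critical"
  else if critical_score ≥ 1 ∨ high_score ≥ 3 then "high"
  else if low_score ≥ 2 then "low"
  else "medium"

-- ===== PORT B =====
-- Source B's _at_least: short-circuit "at least n of keywords occur in text"
def pvAtLeast (keywords : List String) (text : String) (n : Int) : Bool :=
  if n ≤ 0 then true
  else
    match keywords with
    | [] => false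
    | kw :: rest =>
      pvAtLeast rest text (if PySem.Str.isIn kw text then n - 1 else n)

def classify_doc_priority_py_alt (content : String) (path : String) : String :=
  let combined := PySem.Str.lower content ++ " " ++ PySem.Str.lower path
  if pvAtLeast pvCriticalKeywords combined 2 then "critical"
  else if pvAtLeast pvCriticalKeywords combined 1 || pvAtLeast pvHighKeywords combined 3 then "high"
  else if pvAtLeast pvLowKeywords combined 2 then "low"
  else "medium"

-- ===== PRECONDITION & SPEC =====
def Spec_classify_doc_priority_py (content : String) (path : String) (out : String) : Prop := out = classify_doc_priority_py_alt content path
instance (content : String) (path : String) (out : String) : Decidable (Spec_classify_doc_priority_py content path out) := by unfold Spec_classify_doc_priority_py; infer_instance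

-- ===== CLAIM =====
def Claim_equal_classify_doc_priority_py : Prop := ∀ (content : String) (path : String), Dom_classify_doc_priority_py content path → Spec_classify_doc_priority_py content path (classify_doc_priority_py content path)

-- ===== LEMMAS AND PROOFS =====

-- pvAtLeast answers exactly "the number of matching keywords is ≥ n"
theorem pv_atLeast_iff (keywords : List String) (text : String) (n : Int) :
    pvAtLeast keywords text n
      = decide ((keywords.countP (fun kw => PySem.Str.isIn kw text) : Int) ≥ n) := by
  induction keywords generalizing n with
  | nil =>
    unfold pvAtLeast
    by_cases h : n ≤ 0 <;> simp [h]
  | cons kw rest ih =>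
    by_cases h : n ≤ 0
    · have hge : ((List.countP (fun kw => PySem.Str.isIn kw text) (kw :: rest) : Int)) ≥ n := by
        have := Int.natCast_nonneg (List.countP (fun kw => PySem.Str.isIn kw text) (kw :: rest))
        omega
      unfold pvAtLeast
      rw [if_pos h]
      exact (decide_eq_true hge).symm
    · unfold pvAtLeast
      rw [if_neg h]
      show pvAtLeast rest text (if PySem.Str.isIn kw text then n - 1 else n)
        = decide ((List.countP (fun kw => PySem.Str.isIn kw text) (kw :: rest) : Int) ≥ n)
      rw [ih, List.countP_cons, decide_eq_decide]
      cases hkw : PySem.Str.isIn kw text <;> simp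

-- A's 0/1 sum is a count
theorem pv_score_eq (kws : List String) (text : String) :
    (kws.map (fun kw => if PySem.Str.isIn kw text then (1 : Int) else 0)).sum
      = (kws.countP (fun kw => PySem.Str.isIn kw text) : Int) :=
  PySem.List.sum_map_ite_one_zero _ kws

-- ===== VERDICT =====
theorem classify_doc_priority_py_spec : Claim_equal_classify_doc_priority_py := by
  intro content path _
  unfold Spec_classify_doc_priority_py classify_doc_priority_py classify_doc_priority_py_alt
  simp only [pv_score_eq, pv_atLeast_iff, ge_iff_le, Bool.or_eq_true, decide_eq_true_eq]
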